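-- pv_equiv track=rewrite | github.com/boopdotpng/wikibench | wikipedia_bench/text_extract.py | _strip_navbox_region
-- ===== SOURCE A (Python) =====
-- def _strip_navbox_region(wikitext: str) -> str:
--     """Remove navbox/footer template regions from the end of wikitext.
--
--     Navboxes are typically {{Navbox, {{Authority control}}, {{Taxonbar}},
--     {{Portal bar}}, etc. at the very end of the article.
--     """
--     # Common navbox template names (case-insensitive starts)
--     navbox_prefixes = (
--         'navbox', 'authority control', 'taxonbar', 'portal bar',
--         'portal', 'commons category', 'wikiquote', 'wikisource',
--         'wiktionary', 'reflist', 'notelist', 'refbegin', 'refend',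
--         'cite', 'citation', 'sfn', 'efn', 'cnote',
--     )
--
--     lines = wikitext.split('\n')
--     cutoff = len(lines)
--
--     # Scan from the end, looking for where navbox templates start
--     i = len(lines) - 1
--     while i >= 0:
--         stripped = lines[i].strip().lower()
--         if stripped.startswith('{{'):
--             template_name = stripped[2:].split('|')[0].split('}')[0].strip()
--             if any(template_name.startswith(p) for p in navbox_prefixes):
--                 cutoff = i
--                 i -= 1
--                 continue
--         if stripped == '' or stripped.startswith('[[category:'):
--             cutoff = i
--             i -= 1
--             continue
--         break
--
--     return '\n'.join(lines[:cutoff])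
-- ===== SOURCE B (Python) =====
-- def _strip_navbox_region(wikitext: str) -> str:
--     """Build the result back-to-front: walk the lines in reverse, skipping
--     junk (navbox/blank/category) lines until the first real line, then keep
--     everything; finally reverse and join.  No indices or cutoff variable."""
--     navbox_prefixes = (
--         'navbox', 'authority control', 'taxonbar', 'portal bar',
--         'portal', 'commons category', 'wikiquote', 'wikisource',
--         'wiktionary', 'reflist', 'notelist', 'refbegin', 'refend',
--         'cite', 'citation', 'sfn', 'efn', 'cnote',
--     )
--
--     def is_junk(line):
--         s = line.strip().lower()
--         if not s:
--             return True
--         if s.startswith('[[category:'):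
--             return True
--         if not s.startswith('{{'):
--             return False
--         name_chars = []
--         for c in s[2:]:
--             if c == '|' or c == '}':
--                 break
--             name_chars.append(c)
--         name = ''.join(name_chars).strip()
--         return any(map(name.startswith, navbox_prefixes))
--
--     out = []
--     for line in reversed(wikitext.split('\n')):
--         if out or not is_junk(line):
--             out.append(line)
--     out.reverse()
--     return '\n'.join(out)
-- ===== Notes on version B (the rewrite author's own statement) =====
-- stated objective: alternative
-- what changed: Replaces A's backward index-based early-exit while-loop and cutoff slice by a reversed fold that builds the kept lines back-to-front (skip junk until the first real line, then keep all), with an extracted is_junk predicate whose checks are reordered and whose template name is taken character-wise up to the first pipe or closing brace instead of by two splits.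
import Mathlib
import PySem

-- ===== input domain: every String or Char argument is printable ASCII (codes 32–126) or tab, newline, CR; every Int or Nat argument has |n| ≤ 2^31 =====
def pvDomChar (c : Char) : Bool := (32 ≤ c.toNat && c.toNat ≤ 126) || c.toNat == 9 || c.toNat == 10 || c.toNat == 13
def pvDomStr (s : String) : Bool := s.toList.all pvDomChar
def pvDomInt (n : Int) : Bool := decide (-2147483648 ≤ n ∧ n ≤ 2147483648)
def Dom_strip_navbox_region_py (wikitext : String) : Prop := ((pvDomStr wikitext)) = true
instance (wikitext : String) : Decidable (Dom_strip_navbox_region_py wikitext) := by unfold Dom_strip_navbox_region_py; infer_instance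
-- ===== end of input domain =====

-- B builds the result back-to-front (reversed fold: skip junk lines until the first real
-- line, then keep all) with a reordered is_junk predicate that takes the template name
-- character-wise up to the first pipe or closing brace, instead of A's backward cutoff while-loop
-- using two splits; alternative decomposition, same cost.


-- ===== PORT A =====
def pvNavPrefixesA : List String :=
  ["navbox", "authority control", "taxonbar", "portal bar",
   "portal", "commons category", "wikiquote", "wikisource",
   "wiktionary", "reflist", "notelist", "refbegin", "refend",
   "cite", "citation", "sfn", "efn", "cnote"]

-- the while-loop of A: first argument is i+1 (0 = loop has run past i = 0), second is cutoff
-- lines[i] is in range on every call made (i < lines.length), so pyGet? … |>.getD "" is exact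
def stripA_loop (lines : List String) : Nat → Nat → Nat
  | 0, cutoff => cutoff
  | (j+1), cutoff =>
    let stripped := PySem.Str.lower (PySem.Str.strip ((PySem.List.pyGet? lines (j : Int)).getD ""))
    if PySem.Str.startswith stripped "{{" then
      -- split('|')[0] / split('}')[0]: split's result is always nonempty, so getD 0 "" is exact
      let template_name := PySem.Str.strip
        ((PySem.Str.split? ((PySem.Str.split? (PySem.Str.slice stripped (some 2) none) "|").getD [] |>.getD 0 "") "}").getD [] |>.getD 0 "")
      if pvNavPrefixesA.any (fun p => PySem.Str.startswith template_name p) then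
        stripA_loop lines j j
      else
        if stripped == "" || PySem.Str.startswith stripped "[[category:" then
          stripA_loop lines j j
        else cutoff
    else
      if stripped == "" || PySem.Str.startswith stripped "[[category:" then
        stripA_loop lines j j
      else cutoff

def strip_navbox_region_py (wikitext : String) : String :=
  let lines := (PySem.Str.split? wikitext "\n").getD []
  let cutoff := lines.length
  -- lines[:cutoff] with cutoff : Nat, cutoff ≤ len: take is exact
  PySem.Str.join "\n" (lines.take (stripA_loop lines lines.length cutoff))

-- ===== PORT B =====
def pvNavPrefixesB : List String :=
  ["navbox", "authority control", "taxonbar", "portal bar",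
   "portal", "commons category", "wikiquote", "wikisource",
   "wiktionary", "reflist", "notelist", "refbegin", "refend",
   "cite", "citation", "sfn", "efn", "cnote"]

-- the for-loop with break collecting name_chars is the takeWhile of its condition
def pvIsJunk (line : String) : Bool :=
  let s := PySem.Str.lower (PySem.Str.strip line)
  if s == "" then true
  else if PySem.Str.startswith s "[[category:" then true
  else if !(PySem.Str.startswith s "{{") then false
  else
    let name := PySem.Chars.strip ((s.toList.drop 2).takeWhile (fun c => !(c == '|' || c == '}')))
    pvNavPrefixesB.any (fun p => PySem.Chars.startswith name p.toList)

def strip_navbox_region_py_alt (wikitext : String) : String :=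
  let out := (PySem.Str.split? wikitext "\n").getD [] |>.reverse.foldl
      (fun out line => if !out.isEmpty || !pvIsJunk line then out ++ [line] else out) []
  PySem.Str.join "\n" out.reverse

-- ===== PRECONDITION & SPEC =====
def Spec_strip_navbox_region_py (wikitext : String) (out : String) : Prop := out = strip_navbox_region_py_alt wikitext
instance (wikitext : String) (out : String) : Decidable (Spec_strip_navbox_region_py wikitext out) := by unfold Spec_strip_navbox_region_py; infer_instance

-- ===== CLAIM (what is proved, stated in full; the proofs are below) =====
def Claim_equal_strip_navbox_region_py : Prop := ∀ (wikitext : String), Dom_strip_navbox_region_py wikitext → Spec_strip_navbox_region_py wikitext (strip_navbox_region_py wikitext)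

-- ===== LEMMAS AND PROOFS =====

-- splitOn.go ignores a pending accumulator: it is prepended reversed
lemma pvSplitOn_go_acc (c : Char) (fuel : Nat) (l cur : List Char) (acc : List (List Char)) :
    PySem.Chars.splitOn.go [c] fuel l cur acc
      = acc.reverse ++ PySem.Chars.splitOn.go [c] fuel l cur [] := by
  induction fuel generalizing l cur acc with
  | zero => simp [PySem.Chars.splitOn.go]
  | succ f ih =>
      cases l with
      | nil => simp [PySem.Chars.splitOn.go]
      | cons ch rest =>
          simp only [PySem.Chars.splitOn.go]
          split_ifs with h
          · rw [ih _ _ (cur.reverse :: acc), ih _ _ [cur.reverse]]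
            simp
          · exact ih _ _ _

-- head of splitOn.go: the pending chunk followed by everything before the first separator
lemma pvSplitOn_go_head (c : Char) (fuel : Nat) (l cur : List Char) (h : l.length < fuel) :
    (PySem.Chars.splitOn.go [c] fuel l cur []).head?
      = some (cur.reverse ++ l.takeWhile (· ≠ c)) := by
  induction l generalizing fuel cur with
  | nil =>
      cases fuel with
      | zero => omega
      | succ f => simp [PySem.Chars.splitOn.go]
  | cons ch rest ih =>
      cases fuel with
      | zero => omega
      | succ f =>
          simp only [PySem.Chars.splitOn.go]
          split_ifs with hpre
          · have hch : ch = c := by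
              rcases (List.isPrefixOf_iff_prefix.mp hpre : [c] <+: ch :: rest) with ⟨t, ht⟩
              simpa using congrArg (·.head?) ht.symm
            rw [pvSplitOn_go_acc]
            simp [hch]
          · have hch : ¬ ch = c := by
              intro e; exact hpre (by simp [e])
            have hlt : rest.length < f := by simpa using Nat.lt_of_succ_lt_succ h
            rw [ih f (ch :: cur) hlt]
            simp [hch]

-- head of a single-character Python split
lemma pvSplit_head (t sep : String) (c : Char) (hsep : sep.toList = [c]) :
    ((PySem.Str.split? t sep).getD [] |>.getD 0 "").toList
      = t.toList.takeWhile (· ≠ c) := by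
  have hgo := pvSplitOn_go_head c (t.toList.length + 1) t.toList [] (by omega)
  simp only [PySem.Str.split?, PySem.Chars.split?, PySem.Chars.splitOn, hsep]
  simp only [List.isEmpty_cons, if_false, Bool.false_eq_true]
  rcases hhd : PySem.Chars.splitOn.go [c] (t.toList.length + 1) t.toList [] [] with _ | ⟨x, xs⟩
  · rw [hhd] at hgo; simp at hgo
  · rw [hhd] at hgo
    simp at hgo
    simp [hgo]

-- A's strip(split(split(s[2:],'|')[0],'}')[0]) is B's strip(takeWhile) on s[2:]
lemma pvName_eq (s : String) :
    (PySem.Str.strip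
        ((PySem.Str.split? ((PySem.Str.split? (PySem.Str.slice s (some 2) none) "|").getD [] |>.getD 0 "") "}").getD [] |>.getD 0 "")).toList
      = PySem.Chars.strip ((s.toList.drop 2).takeWhile (fun c => !(c == '|' || c == '}'))) := by
  rw [PySem.Str.toList_strip]
  refine congrArg PySem.Chars.strip ?_
  rw [pvSplit_head _ "}" '}' rfl]
  rw [pvSplit_head _ "|" '|' rfl]
  rw [PySem.Str.toList_slice]
  have hs : PySem.Chars.slice s.toList (some 2) none = s.toList.drop 2 := by simp [pysem]
  rw [hs, List.takeWhile_takeWhile]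
  apply congrFun (congrArg List.takeWhile (funext fun c => ?_))
  by_cases h1 : c = '|' <;> by_cases h2 : c = '}' <;> simp [h1, h2]

lemma pvDecision_eq (line : String) :
    (let s := PySem.Str.lower (PySem.Str.strip line)
     if PySem.Str.startswith s "{{" then
       (if pvNavPrefixesA.any (fun p => PySem.Str.startswith (PySem.Str.strip
           ((PySem.Str.split? ((PySem.Str.split? (PySem.Str.slice s (some 2) none) "|").getD [] |>.getD 0 "") "}").getD [] |>.getD 0 "")) p) then true
        else (s == "" || PySem.Str.startswith s "[[category:"))
     else (s == "" || PySem.Str.startswith s "[[category:")) = pvIsJunk line := by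
  unfold pvIsJunk
  show (if PySem.Str.startswith (PySem.Str.lower (PySem.Str.strip line)) "{{" then _ else _) = _
  generalize PySem.Str.lower (PySem.Str.strip line) = s
  have hany : (pvNavPrefixesA.any (fun p => PySem.Str.startswith (PySem.Str.strip
        ((PySem.Str.split? ((PySem.Str.split? (PySem.Str.slice s (some 2) none) "|").getD [] |>.getD 0 "") "}").getD [] |>.getD 0 "")) p))
      = (pvNavPrefixesB.any (fun p => PySem.Chars.startswith
        (PySem.Chars.strip ((s.toList.drop 2).takeWhile (fun c => !(c == '|' || c == '}')))) p.toList)) := by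
    have hf : (fun p => PySem.Str.startswith (PySem.Str.strip
        ((PySem.Str.split? ((PySem.Str.split? (PySem.Str.slice s (some 2) none) "|").getD [] |>.getD 0 "") "}").getD [] |>.getD 0 "")) p)
        = (fun p : String => PySem.Chars.startswith
        (PySem.Chars.strip ((s.toList.drop 2).takeWhile (fun c => !(c == '|' || c == '}')))) p.toList) := by
      funext p
      show PySem.Chars.startswith _ p.toList = _
      rw [pvName_eq]
    rw [hf]
    rfl
  simp only [PySem.Str.startswith, List.getD_eq_getElem?_getD] at hany ⊢
  by_cases hbb : s = ""
  · subst hbb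
    simp
  · have hb : (s == "") = false := by simpa using hbb
    rcases hbr : PySem.Chars.startswith s.toList ('{' :: '{' :: []) with _ | _
    · rcases hc : PySem.Chars.startswith s.toList ('[' :: '[' :: 'c' :: 'a' :: 't' :: 'e' :: 'g' :: 'o' :: 'r' :: 'y' :: ':' :: []) with _ | _
        <;> simp [hb, hbr, hc]
    · have hc : PySem.Chars.startswith s.toList ('[' :: '[' :: 'c' :: 'a' :: 't' :: 'e' :: 'g' :: 'o' :: 'r' :: 'y' :: ':' :: []) = false := by
        rcases hpre : PySem.Chars.startswith s.toList ('[' :: '[' :: 'c' :: 'a' :: 't' :: 'e' :: 'g' :: 'o' :: 'r' :: 'y' :: ':' :: []) with _ | _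
        · rfl
        · exfalso
          rcases (PySem.Chars.startswith_iff _ _).mp hbr with ⟨t1, ht1⟩
          rcases (PySem.Chars.startswith_iff _ _).mp hpre with ⟨t2, ht2⟩
          have : ('{' : Char) = '[' := by
            have h3 := ht1.trans ht2.symm
            simpa using congrArg (·.head?) h3
          simp at this
      rw [hany]
      rcases hA : (pvNavPrefixesB.any fun p =>
          PySem.Chars.startswith
            (PySem.Chars.strip (List.takeWhile (fun c => !(c == '|' || c == '}')) (List.drop 2 s.toList))) p.toList) with _ | _
        <;> simp [hb, hbr, hc]

-- A's per-line continue/break decision is B's pvIsJunk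
-- unfolding one step of A's while-loop through the junk predicate
lemma stripA_loop_succ (lines : List String) (j : Nat) (hj : j < lines.length) (cutoff : Nat) :
    stripA_loop lines (j+1) cutoff =
      if pvIsJunk lines[j] then stripA_loop lines j j else cutoff := by
  have hget : (PySem.List.pyGet? lines (j : Int)).getD "" = lines[j] := by
    simp [hj]
  have hdec := pvDecision_eq lines[j]
  simp only [] at hdec
  rw [← hdec]
  simp only [stripA_loop, hget]
  split_ifs <;> simp_all

-- A's loop counts the junk suffix of the first k lines
lemma stripA_loop_eq (lines : List String) (k : Nat) (hk : k ≤ lines.length) :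
    stripA_loop lines k k = k - ((lines.take k).reverse.takeWhile pvIsJunk).length := by
  induction k with
  | zero => simp [stripA_loop]
  | succ j ih =>
      have hj : j < lines.length := hk
      rw [stripA_loop_succ lines j hj]
      have htk : (lines.take (j+1)).reverse = lines[j] :: (lines.take j).reverse := by
        rw [List.take_add_one, List.getElem?_eq_getElem hj]
        simp
      rw [htk, List.takeWhile_cons]
      by_cases hx : pvIsJunk lines[j]
      · have hlen : ((lines.take j).reverse.takeWhile pvIsJunk).length ≤ j := by
          have h1 := List.IsPrefix.length_le (List.takeWhile_prefix (l := (lines.take j).reverse) pvIsJunk)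
          simpa [Nat.min_eq_left (Nat.le_of_lt hj)] using h1
        rw [ih (Nat.le_of_lt hj)]
        simp [hx]
      · simp [hx]

-- B's fold over the reversed lines drops the junk prefix (of the reversed list)
lemma pvFold_nonempty (xs out : List String) (h : out ≠ []) :
    xs.foldl (fun out line => if !out.isEmpty || !pvIsJunk line then out ++ [line] else out) out
      = out ++ xs := by
  induction xs generalizing out with
  | nil => simp
  | cons x t ih =>
      simp only [List.foldl_cons]
      rw [if_pos (by simp [h]), ih _ (by simp)]
      simp

lemma pvFold_eq_dropWhile (xs : List String) :
    xs.foldl (fun out line => if !out.isEmpty || !pvIsJunk line then out ++ [line] else out) []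
      = xs.dropWhile pvIsJunk := by
  induction xs with
  | nil => simp
  | cons x t ih =>
      simp only [List.foldl_cons, List.dropWhile_cons]
      by_cases hx : pvIsJunk x
      · simpa [hx] using ih
      · rw [if_pos (by simp [hx]), pvFold_nonempty _ _ (by simp)]
        simp [hx]

-- L with the junk suffix (= junk prefix of the reverse) removed, as a take
lemma pvTake_key (dw tw L : List String) (hL : L = dw.reverse ++ tw.reverse) :
    L.take (L.length - tw.length) = dw.reverse := by
  subst hL
  have h : (dw.reverse ++ tw.reverse).length - tw.length = dw.reverse.length := by
    simp
  rw [h, List.take_left]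

lemma pvTake_eq (L : List String) :
    L.take (L.length - (L.reverse.takeWhile pvIsJunk).length) = (L.reverse.dropWhile pvIsJunk).reverse :=
  pvTake_key _ _ _ (by
    rw [← List.reverse_append, List.takeWhile_append_dropWhile, List.reverse_reverse])

-- ===== VERDICT (by name: the statement is the Claim_ definition above) =====
theorem strip_navbox_region_py_spec : Claim_equal_strip_navbox_region_py := by
  intro wikitext _
  unfold Spec_strip_navbox_region_py strip_navbox_region_py strip_navbox_region_py_alt
  simp only []
  rw [stripA_loop_eq _ _ le_rfl, pvFold_eq_dropWhile, List.take_length, pvTake_eq]
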